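-- pv_equiv track=rewrite | github.com/Eszti/dipterv | panlex/models/data_model.py | _wp_list_2_dict
-- ===== SOURCE A (Python) =====
-- def _wp_list_2_dict(wp_l):
--     l12 = dict()
--     l21 = dict()
--     for (w1, w2) in wp_l:
--         if w1 not in l12:
--             l12[w1] = [w2]
--         else:
--             l12[w1].append(w2)
--         if w2 not in l21:
--             l21[w2] = [w1]
--         else:
--             l21[w2].append(w1)
--     return l12, l21
-- ===== SOURCE B (Python) =====
-- def _group(pairs):
--     d = dict()
--     for k, v in pairs:
--         d.setdefault(k, []).append(v)
--     return d
--
--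
-- def _wp_list_2_dict(wp_l):
--     pairs = list(wp_l)
--     return _group(pairs), _group((w2, w1) for (w1, w2) in pairs)
-- ===== Notes on version B (the rewrite author's own statement) =====
-- stated objective: simpler
-- what changed: Replaces the single interleaved loop maintaining two dicts with branching membership tests by one reusable setdefault-based grouping helper applied twice (once to the pairs, once to the swapped pairs).
import Mathlib
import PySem

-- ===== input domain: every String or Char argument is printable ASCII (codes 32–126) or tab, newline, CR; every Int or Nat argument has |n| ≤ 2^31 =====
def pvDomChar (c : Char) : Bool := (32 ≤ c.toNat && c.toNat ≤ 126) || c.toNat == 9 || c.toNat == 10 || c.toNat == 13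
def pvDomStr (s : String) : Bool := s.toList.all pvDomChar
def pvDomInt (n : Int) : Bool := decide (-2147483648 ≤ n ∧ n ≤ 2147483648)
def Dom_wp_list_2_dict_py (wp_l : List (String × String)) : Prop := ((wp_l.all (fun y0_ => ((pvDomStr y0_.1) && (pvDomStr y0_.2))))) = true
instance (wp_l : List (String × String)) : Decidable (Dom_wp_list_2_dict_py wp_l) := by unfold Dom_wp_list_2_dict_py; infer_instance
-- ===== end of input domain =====

-- B replaces A's single interleaved loop over two dicts by one reusable grouping helper
-- applied twice (to the pairs and to the swapped pairs); objective: simpler.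


-- ===== PORT A =====
-- one loop step of A on one dict: 'if w not in d: d[w] = [v] else: d[w].append(v)'
def pvStepA (d : PySem.Dict String (List String)) (w v : String) : PySem.Dict String (List String) :=
  if d.contains w then d.modify w [] (fun l => l ++ [v]) else d.insert w [v]

def wp_list_2_dict_py (wp_l : List (String × String)) : (List (String × List String)) × (List (String × List String)) :=
  let st := wp_l.foldl (fun (st : PySem.Dict String (List String) × PySem.Dict String (List String)) p =>
      (pvStepA st.1 p.1 p.2, pvStepA st.2 p.2 p.1)) (PySem.Dict.empty, PySem.Dict.empty)
  (st.1.items, st.2.items)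

-- ===== PORT B =====
-- B's helper _group: d.setdefault(k, []).append(v) over the pairs
def pvGroup (pairs : List (String × String)) : PySem.Dict String (List String) :=
  pairs.foldl (fun d p => d.modify p.1 [] (fun l => l ++ [p.2])) PySem.Dict.empty

def wp_list_2_dict_py_alt (wp_l : List (String × String)) : (List (String × List String)) × (List (String × List String)) :=
  ((pvGroup wp_l).items, (pvGroup (wp_l.map (fun p => (p.2, p.1)))).items)

-- ===== PRECONDITION & SPEC =====
def Spec_wp_list_2_dict_py (wp_l : List (String × String)) (out : (List (String × List String)) × (List (String × List String))) : Prop := out = wp_list_2_dict_py_alt wp_l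
instance (wp_l : List (String × String)) (out : (List (String × List String)) × (List (String × List String))) : Decidable (Spec_wp_list_2_dict_py wp_l out) := by unfold Spec_wp_list_2_dict_py; infer_instance

-- ===== CLAIM (what is proved, stated in full; the proofs are below) =====
def Claim_equal_wp_list_2_dict_py : Prop := ∀ (wp_l : List (String × String)), Dom_wp_list_2_dict_py wp_l → Spec_wp_list_2_dict_py wp_l (wp_list_2_dict_py wp_l)

-- ===== LEMMAS AND PROOFS =====
-- A's branching step is exactly a setdefault-append (modify with default []):
-- when the key is absent its stored list defaults to [], so insert w [v] = modify w [] (· ++ [v]).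
theorem pvStepA_eq_modify (d : PySem.Dict String (List String)) (w v : String) :
    pvStepA d w v = d.modify w [] (fun l => l ++ [v]) := by
  unfold pvStepA
  by_cases h : d.contains w
  · simp [h]
  · simp only [Bool.not_eq_true] at h
    simp [h, PySem.Dict.modify, PySem.Dict.getD_of_not_contains _ _ h]

-- ===== VERDICT (by name: the statement is the Claim_ definition above) =====
theorem wp_list_2_dict_py_spec : Claim_equal_wp_list_2_dict_py := by
  intro wp_l _
  show _ = _
  unfold wp_list_2_dict_py wp_list_2_dict_py_alt pvGroup
  simp only [pvStepA_eq_modify]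
  have h := PySem.List.foldl_prod_mk (fun d (p : String × String) => d.modify p.1 [] (fun l => l ++ [p.2]))
        (fun d (p : String × String) => d.modify p.2 [] (fun l => l ++ [p.1])) wp_l PySem.Dict.empty PySem.Dict.empty
  simp only at h
  rw [h]
  simp only [List.foldl_map]
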